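-- pv_equiv track=rewrite | github.com/zunair-kashif08/Simple-Multithreaded-Port-Scanner | port_scanner.py | divide_port_range
-- ===== SOURCE A (Python) =====
-- def divide_port_range(start_port, end_port, num_of_threads):
--     # Total number of ports to scan
--     total_ports = end_port - start_port + 1
--     # Number of ports each thread should handle
--     ports_per_thread = total_ports // num_of_threads
--     # Remaining ports after equal division
--     remainder = total_ports % num_of_threads
--
--     ranges = []
--     current_start = start_port
--     # Create port ranges for each thread
--     for i in range(num_of_threads):
--         # Calculate end port for this thread
--         current_end = current_start + ports_per_thread - 1
--         # Distribute leftover ports one by one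
--         if remainder > 0:
--             current_end += 1
--             remainder -= 1
--         # Append the range as a tuple
--         ranges.append((current_start, current_end))
--         # Move to the next starting port
--         current_start = current_end + 1
--
--     return ranges
-- ===== SOURCE B (Python) =====
-- def divide_port_range(start_port, end_port, num_of_threads):
--     total_ports = end_port - start_port + 1
--     ports_per_thread = total_ports // num_of_threads
--     remainder = total_ports % num_of_threads
--     def sub(i):
--         s = start_port + i * ports_per_thread + min(i, remainder)
--         return (s, s + ports_per_thread - 1 + (1 if i < remainder else 0))
--     return [sub(i) for i in range(num_of_threads)]
-- ===== Notes on version B (the rewrite author's own statement) =====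
-- stated objective: alternative
-- what changed: Each thread's subrange is computed independently by a closed-form formula (start = start_port + i*ports_per_thread + min(i, remainder)) in a comprehension, instead of threading current_start and a mutating remainder through a loop.
import Mathlib
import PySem

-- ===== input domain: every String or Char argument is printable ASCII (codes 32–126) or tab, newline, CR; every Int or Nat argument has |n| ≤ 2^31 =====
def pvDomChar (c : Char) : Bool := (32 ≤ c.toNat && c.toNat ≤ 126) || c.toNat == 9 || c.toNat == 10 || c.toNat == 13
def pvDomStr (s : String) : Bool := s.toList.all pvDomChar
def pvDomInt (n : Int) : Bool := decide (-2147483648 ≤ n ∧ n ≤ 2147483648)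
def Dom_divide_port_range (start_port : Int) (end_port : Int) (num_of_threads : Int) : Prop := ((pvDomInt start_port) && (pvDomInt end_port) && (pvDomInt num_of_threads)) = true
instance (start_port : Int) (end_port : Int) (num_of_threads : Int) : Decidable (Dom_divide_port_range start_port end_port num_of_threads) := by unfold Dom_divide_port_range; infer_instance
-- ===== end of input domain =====

-- B computes each subrange by a closed-form formula instead of threading a running
-- current_start/remainder accumulator through the loop (objective: alternative).

-- ===== PORT A =====
-- literal port of A: fold over range(num_of_threads) threading (ranges, current_start, remainder)
def divide_port_range (start_port : Int) (end_port : Int) (num_of_threads : Int) : List (Int × Int) :=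
  let total_ports := end_port - start_port + 1
  let ports_per_thread := PySem.Int.floordiv total_ports num_of_threads
  let remainder := PySem.Int.mod total_ports num_of_threads
  let st := (PySem.List.pyRange 0 num_of_threads 1).foldl
    (fun (s : List (Int × Int) × Int × Int) _ =>
      let current_end := s.2.1 + ports_per_thread - 1
      let (current_end, rem) := if s.2.2 > 0 then (current_end + 1, s.2.2 - 1) else (current_end, s.2.2)
      (s.1 ++ [(s.2.1, current_end)], current_end + 1, rem))
    ([], start_port, remainder)
  st.1

-- ===== PORT B =====
-- literal port of B: each subrange computed independently by a closed form
def divide_port_range_alt (start_port : Int) (end_port : Int) (num_of_threads : Int) : List (Int × Int) :=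
  let total_ports := end_port - start_port + 1
  let ports_per_thread := PySem.Int.floordiv total_ports num_of_threads
  let remainder := PySem.Int.mod total_ports num_of_threads
  (PySem.List.pyRange 0 num_of_threads 1).map (fun i =>
    let s := start_port + i * ports_per_thread + min i remainder
    (s, s + ports_per_thread - 1 + (if i < remainder then 1 else 0)))

-- ===== PRECONDITION & SPEC =====
-- Python A raises ZeroDivisionError when num_of_threads == 0; excluded.
def Pre_divide_port_range (start_port : Int) (end_port : Int) (num_of_threads : Int) : Prop := num_of_threads ≠ 0
instance (start_port : Int) (end_port : Int) (num_of_threads : Int) : Decidable (Pre_divide_port_range start_port end_port num_of_threads) := by unfold Pre_divide_port_range; infer_instance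
def pvWitness_divide_port_range : Int × Int × Int := (20, 30, 4)
def Spec_divide_port_range (start_port : Int) (end_port : Int) (num_of_threads : Int) (out : List (Int × Int)) : Prop := out = divide_port_range_alt start_port end_port num_of_threads
instance (start_port : Int) (end_port : Int) (num_of_threads : Int) (out : List (Int × Int)) : Decidable (Spec_divide_port_range start_port end_port num_of_threads out) := by unfold Spec_divide_port_range; infer_instance

-- ===== CLAIM (what is proved, stated in full; the proofs are below) =====
def Claim_equal_divide_port_range : Prop := ∀ (start_port : Int) (end_port : Int) (num_of_threads : Int), Dom_divide_port_range start_port end_port num_of_threads → Pre_divide_port_range start_port end_port num_of_threads → Spec_divide_port_range start_port end_port num_of_threads (divide_port_range start_port end_port num_of_threads)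

-- ===== LEMMAS AND PROOFS =====

-- loop invariant: after m iterations the accumulated state is exactly the first m
-- closed-form subranges, the next start, and the remaining leftover count
theorem dpr_loop_inv (sp ppt r : Int) (hr : 0 ≤ r) (m : Nat) :
    (PySem.List.pyRange 0 (m : Int) 1).foldl
      (fun (s : List (Int × Int) × Int × Int) _ =>
        let current_end := s.2.1 + ppt - 1
        let (current_end, rem) := if s.2.2 > 0 then (current_end + 1, s.2.2 - 1) else (current_end, s.2.2)
        (s.1 ++ [(s.2.1, current_end)], current_end + 1, rem))
      ([], sp, r)
    = ((PySem.List.pyRange 0 (m : Int) 1).map (fun i =>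
         let s := sp + i * ppt + min i r
         (s, s + ppt - 1 + (if i < r then 1 else 0))),
       sp + (m : Int) * ppt + min (m : Int) r, r - min (m : Int) r) := by
  induction m with
  | zero => simp [PySem.List.pyRange_one_eq_nil]; omega
  | succ m ih =>
    have h1 : ((m : Int) + 1) = ((m + 1 : Nat) : Int) := by push_cast; ring
    have h2 : PySem.List.pyRange 0 ((m + 1 : Nat) : Int) 1
        = PySem.List.pyRange 0 (m : Int) 1 ++ [(m : Int)] := by
      rw [← h1, PySem.List.pyRange_one_succ_right (by positivity)]
    rw [h2, List.foldl_append, List.map_append, ih]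
    simp only [List.foldl_cons, List.foldl_nil, List.map_cons, List.map_nil]
    by_cases hm : (m : Int) < r
    · have hmin : min (m : Int) r = (m : Int) := by omega
      have hmin' : min ((m : Int) + 1) r = (m : Int) + 1 := by omega
      simp only [hmin]
      rw [if_pos (by omega), if_pos hm]
      push_cast
      simp only [hmin']
      simp only [Prod.mk.injEq]
      and_intros <;> first | ring | trivial
    · have hmin : min (m : Int) r = r := by omega
      have hmin' : min ((m : Int) + 1) r = r := by omega
      simp only [hmin]
      rw [if_neg (by omega), if_neg hm]
      push_cast
      simp only [hmin']
      simp only [Prod.mk.injEq]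
      and_intros <;> first | ring | trivial

-- ===== VERDICT (by name: the statement is the Claim_ definition above) =====
theorem divide_port_range_spec : Claim_equal_divide_port_range := by
  intro sp ep nt _ hnt
  unfold Spec_divide_port_range divide_port_range divide_port_range_alt
  rcases lt_trichotomy nt 0 with h | h | h
  · simp [PySem.List.pyRange_one_eq_nil (by omega : nt ≤ 0)]
  · exact absurd h hnt
  · obtain ⟨m, rfl⟩ := Int.eq_ofNat_of_zero_le h.le
    have hr : 0 ≤ PySem.Int.mod (ep - sp + 1) (m : Int) := PySem.Int.mod_nonneg _ h
    simp only [dpr_loop_inv sp (PySem.Int.floordiv (ep - sp + 1) (m : Int))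
      (PySem.Int.mod (ep - sp + 1) (m : Int)) hr m]
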